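-- pv_equiv track=rewrite | github.com/holylovenia/Seleksi-1-Asisten-LabPro-2018 | src/5-Problem01.py | checkBysimmetric
-- ===== SOURCE A (Python) =====
-- def checkBysimmetric(dim, matrix):
--   half = 0
--
--   if(dim % 2 == 1):
--     half = dim//2 + 1
--   else :
--     half = dim//2
--
--   for i in range(half):
--     for j in range(dim):
--       if((matrix[i][j] != matrix[j][i]) or (matrix[i][j] != matrix[dim-1-j][dim-1-i])):
--         return False
--
--   return True
-- ===== SOURCE B (Python) =====
-- def checkBysimmetric(dim, matrix):
--     block = [row[:dim] for row in matrix[:dim]]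
--     t = [[row[i] for row in block] for i in range(dim)]
--     r = [[block[dim - 1 - j][dim - 1 - i] for j in range(dim)] for i in range(dim)]
--     return block == t and block == r
-- ===== Notes on version B (the rewrite author's own statement) =====
-- stated objective: alternative
-- what changed: A does a fused early-exit index scan over the first ceil(dim/2) rows comparing each cell with its transpose and anti-transpose partners; B instead materialises the dim-by-dim block, its transpose and its anti-transpose as whole derived matrices and returns block == t and block == r by structural list comparison.
-- outside the precondition, e.g. on checkBysimmetric(-1, [[1], [2, 1, 1], [1, 2, 1, 2]]): A returns True, B returns False; on checkBysimmetric(2, [[1], [0, 2, 1, 0]]): A returns False, B raises IndexError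
import Mathlib
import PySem

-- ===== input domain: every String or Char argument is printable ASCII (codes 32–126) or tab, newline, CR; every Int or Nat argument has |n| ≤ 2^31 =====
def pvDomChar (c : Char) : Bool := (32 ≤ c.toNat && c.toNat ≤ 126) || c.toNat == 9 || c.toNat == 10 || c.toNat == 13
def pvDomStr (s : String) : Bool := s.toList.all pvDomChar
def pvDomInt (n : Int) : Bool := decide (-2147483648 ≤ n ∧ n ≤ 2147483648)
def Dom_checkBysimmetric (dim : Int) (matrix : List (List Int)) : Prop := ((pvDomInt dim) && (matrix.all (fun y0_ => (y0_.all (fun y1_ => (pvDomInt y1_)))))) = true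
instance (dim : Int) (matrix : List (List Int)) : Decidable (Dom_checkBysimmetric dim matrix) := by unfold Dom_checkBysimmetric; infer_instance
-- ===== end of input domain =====

-- B replaces A's fused early-exit index scan over the first ⌈dim/2⌉ rows by building the
-- dim×dim block, its transpose and its anti-transpose, and comparing whole matrices
-- (objective: alternative, no speed claim).

-- ===== PORT A =====
-- matrix[i][j]; none = IndexError (those inputs lie outside Pre_)
def pyAt2 (matrix : List (List Int)) (i j : Int) : Option Int :=
  (PySem.List.pyGet? matrix i).bind (fun row => PySem.List.pyGet? row j)

-- the condition of A's inner 'if'; 'false' on a none branch = Python IndexError, outside Pre_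
def aCell (dim : Int) (matrix : List (List Int)) (i j : Int) : Bool :=
  match pyAt2 matrix i j, pyAt2 matrix j i, pyAt2 matrix (dim - 1 - j) (dim - 1 - i) with
  | some a, some b, some c => a == b && a == c
  | _, _, _ => false

def checkBysimmetric (dim : Int) (matrix : List (List Int)) : Bool :=
  let half : Int :=
    if PySem.Int.mod dim 2 == 1 then PySem.Int.floordiv dim 2 + 1
    else PySem.Int.floordiv dim 2
  (PySem.List.pyRange 0 half 1).all (fun i =>
    (PySem.List.pyRange 0 dim 1).all (fun j => aCell dim matrix i j))

-- ===== PORT B =====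
-- slice is row[:dim] / matrix[:dim]; pyGetD is row[i] / block[...] (its default is never
-- reached on inputs admitted by Pre_, where Python would raise IndexError)
def checkBysimmetric_alt (dim : Int) (matrix : List (List Int)) : Bool :=
  let block := (PySem.List.slice matrix none (some dim)).map
    (fun row => PySem.List.slice row none (some dim))
  let t := (PySem.List.pyRange 0 dim 1).map (fun i =>
    block.map (fun row => PySem.List.pyGetD row i 0))
  let r := (PySem.List.pyRange 0 dim 1).map (fun i =>
    (PySem.List.pyRange 0 dim 1).map (fun j =>
      PySem.List.pyGetD (PySem.List.pyGetD block (dim - 1 - j) []) (dim - 1 - i) 0))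
  block == t && block == r

-- ===== PRECONDITION & SPEC =====
-- Pre_ keeps exactly the inputs where A's whole dim×dim scan is in range: outside it A
-- raises IndexError, or returns an accidental value (True for dim < 0, an early-exit False
-- on a ragged matrix before the out-of-range access), while B judges the full dim×dim block.
def Pre_checkBysimmetric (dim : Int) (matrix : List (List Int)) : Prop :=
  0 ≤ dim ∧ dim ≤ (matrix.length : Int) ∧
    ∀ i < dim.toNat, dim ≤ ((matrix.getD i []).length : Int)
instance (dim : Int) (matrix : List (List Int)) : Decidable (Pre_checkBysimmetric dim matrix) := by
  unfold Pre_checkBysimmetric; infer_instance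

def pvWitness_checkBysimmetric : Int × List (List Int) := (2, [[1, 2], [2, 1]])

def Spec_checkBysimmetric (dim : Int) (matrix : List (List Int)) (out : Bool) : Prop := out = checkBysimmetric_alt dim matrix
instance (dim : Int) (matrix : List (List Int)) (out : Bool) : Decidable (Spec_checkBysimmetric dim matrix out) := by unfold Spec_checkBysimmetric; infer_instance

-- ===== CLAIM (what is proved, stated in full; the proofs are below) =====
def Claim_equal_checkBysimmetric : Prop := ∀ (dim : Int) (matrix : List (List Int)), Dom_checkBysimmetric dim matrix → Pre_checkBysimmetric dim matrix → Spec_checkBysimmetric dim matrix (checkBysimmetric dim matrix)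

-- ===== LEMMAS AND PROOFS =====

-- total elementwise access used by the proofs
def gAt (matrix : List (List Int)) (i j : Nat) : Int := (matrix.getD i []).getD j 0

-- the bisymmetry condition at one cell
def cellP (matrix : List (List Int)) (n i j : Nat) : Prop :=
  gAt matrix i j = gAt matrix j i ∧ gAt matrix i j = gAt matrix (n - 1 - j) (n - 1 - i)

-- checking the first ⌈n/2⌉ rows suffices
lemma half_suffices (n : Nat) (g : Nat → Nat → Int)
    (h : ∀ i < (n + 1) / 2, ∀ j < n, g i j = g j i ∧ g i j = g (n - 1 - j) (n - 1 - i)) :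
    ∀ i < n, ∀ j < n, g i j = g j i ∧ g i j = g (n - 1 - j) (n - 1 - i) := by
  intro i hi j hj
  by_cases hih : i < (n + 1) / 2
  · exact h i hih j hj
  · have hσi : n - 1 - i < (n + 1) / 2 := by omega
    have e1 : n - 1 - (n - 1 - j) = j := by omega
    have e2 : n - 1 - (n - 1 - i) = i := by omega
    by_cases hjh : j < (n + 1) / 2
    · have h1 := h j hjh i hi
      have h2 := h (n - 1 - i) hσi (n - 1 - j) (by omega)
      rw [e1, e2] at h2
      exact ⟨h1.1.symm, by rw [← h1.1, h1.2]; exact h2.1⟩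
    · have hσj : n - 1 - j < (n + 1) / 2 := by omega
      have h3 := h (n - 1 - j) hσj (n - 1 - i) (by omega)
      rw [e1, e2] at h3
      have h4 := h (n - 1 - i) hσi (n - 1 - j) (by omega)
      rw [e1, e2] at h4
      refine ⟨?_, h3.2.symm⟩
      rw [← h3.2, h3.1]; exact h4.2

lemma pyAt2_eq (matrix : List (List Int)) (n : Nat)
    (hn : n ≤ matrix.length) (hrow : ∀ i < n, n ≤ (matrix.getD i []).length)
    (i j : Int) (hi : 0 ≤ i) (hi2 : i < (n : Int)) (hj : 0 ≤ j) (hj2 : j < (n : Int)) :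
    pyAt2 matrix i j = some (gAt matrix i.toNat j.toNat) := by
  have hi' : i < (matrix.length : Int) := by omega
  have hr := hrow i.toNat (by omega)
  rw [List.getD_eq_getElem matrix [] (by omega)] at hr
  unfold pyAt2
  rw [PySem.List.pyGet?_eq_some_getElem matrix hi hi']
  rw [Option.bind_some, PySem.List.pyGet?_eq_some_getElem (matrix[i.toNat]'(by omega)) hj (by omega)]
  unfold gAt
  rw [List.getD_eq_getElem matrix [] (by omega), List.getD_eq_getElem _ 0 (by omega)]

lemma aCell_iff (matrix : List (List Int)) (n : Nat)
    (hn : n ≤ matrix.length) (hrow : ∀ i < n, n ≤ (matrix.getD i []).length)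
    (i j : Int) (hi : 0 ≤ i) (hi2 : i < (n : Int)) (hj : 0 ≤ j) (hj2 : j < (n : Int)) :
    (aCell (n : Int) matrix i j = true) ↔ cellP matrix n i.toNat j.toNat := by
  unfold aCell
  rw [pyAt2_eq matrix n hn hrow i j hi hi2 hj hj2,
      pyAt2_eq matrix n hn hrow j i hj hj2 hi hi2,
      pyAt2_eq matrix n hn hrow ((n : Int) - 1 - j) ((n : Int) - 1 - i) (by omega) (by omega) (by omega) (by omega)]
  have e1 : ((n : Int) - 1 - j).toNat = n - 1 - j.toNat := by omega
  have e2 : ((n : Int) - 1 - i).toNat = n - 1 - i.toNat := by omega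
  simp only [cellP, e1, e2, Bool.and_eq_true, beq_iff_eq]

lemma a_true_iff (n : Nat) (matrix : List (List Int))
    (hn : n ≤ matrix.length) (hrow : ∀ i < n, n ≤ (matrix.getD i []).length) :
    checkBysimmetric (n : Int) matrix = true ↔
      ∀ i < (n + 1) / 2, ∀ j < n, cellP matrix n i j := by
  unfold checkBysimmetric
  have hhalf : (if PySem.Int.mod (n : Int) 2 == 1 then PySem.Int.floordiv (n : Int) 2 + 1
      else PySem.Int.floordiv (n : Int) 2) = (((n + 1) / 2 : Nat) : Int) := by
    rw [PySem.Int.mod_eq_emod_of_pos (by norm_num), PySem.Int.floordiv_eq_ediv_of_pos (by norm_num)]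
    split_ifs with h
    · simp only [beq_iff_eq] at h; omega
    · simp only [beq_iff_eq] at h; omega
  simp only [hhalf]
  rw [List.all_eq_true]
  constructor
  · intro h i hi j hj
    have h1 := h (i : Int) (by rw [PySem.List.mem_pyRange_one]; omega)
    rw [List.all_eq_true] at h1
    have h2 := h1 (j : Int) (by rw [PySem.List.mem_pyRange_one]; omega)
    have h3 := (aCell_iff matrix n hn hrow (i : Int) (j : Int) (by omega) (by omega) (by omega) (by omega)).1 h2
    simpa using h3
  · intro h x hx
    rw [PySem.List.mem_pyRange_one] at hx
    rw [List.all_eq_true]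
    intro y hy
    rw [PySem.List.mem_pyRange_one] at hy
    rw [aCell_iff matrix n hn hrow x y (by omega) (by omega) (by omega) (by omega)]
    exact h x.toNat (by omega) y.toNat (by omega)

lemma eq_map_range_iff (m : List (List Int)) (n : Nat)
    (hlen : m.length = n) (hrow : ∀ row ∈ m, row.length = n)
    (F : Int → List Int) (hFlen : ∀ k < n, (F (k : Int)).length = n) :
    (m = (PySem.List.pyRange 0 (n : Int) 1).map F) ↔
      ∀ i < n, ∀ j < n, gAt m i j = (F (i : Int)).getD j 0 := by
  constructor
  · intro heq i hi j hj
    unfold gAt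
    conv_lhs => rw [heq]
    have hF : ((PySem.List.pyRange 0 (n : Int) 1).map F).getD i [] = F (i : Int) := by
      rw [← PySem.List.pyGetD_natCast]
      exact PySem.List.pyGetD_map_pyRange F n i [] hi
    rw [hF]
  · intro h
    apply List.ext_getElem
    · simp [PySem.List.length_pyRange_one, hlen]
    · intro k h1 h2
      have hk : k < n := by omega
      have hmap : ((PySem.List.pyRange 0 (n : Int) 1).map F)[k]'h2 = F (k : Int) := by
        rw [List.getElem_map, PySem.List.getElem_pyRange_one]
        norm_num
      rw [hmap]
      apply List.ext_getElem
      · rw [hrow _ (List.getElem_mem _), hFlen k hk]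
      · intro j hj1 hj2
        have hjn : j < n := by rw [hrow _ (List.getElem_mem _)] at hj1; omega
        have hh := h k hk j hjn
        unfold gAt at hh
        rw [List.getD_eq_getElem m [] (by omega), List.getD_eq_getElem _ 0 (by omega),
            List.getD_eq_getElem _ 0 (by rw [hFlen k hk]; omega)] at hh
        exact hh

-- B's comparison on an exactly square matrix m
lemma square_check (m : List (List Int)) (n : Nat)
    (hlen : m.length = n) (hrow : ∀ row ∈ m, row.length = n) :
    ((m == (PySem.List.pyRange 0 (n : Int) 1).map (fun i =>
        m.map (fun row => PySem.List.pyGetD row i 0)) &&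
      m == (PySem.List.pyRange 0 (n : Int) 1).map (fun i =>
        (PySem.List.pyRange 0 (n : Int) 1).map (fun j =>
          PySem.List.pyGetD (PySem.List.pyGetD m ((n : Int) - 1 - j) []) ((n : Int) - 1 - i) 0))) = true)
      ↔ ∀ i < n, ∀ j < n, cellP m n i j := by
  rw [Bool.and_eq_true, beq_iff_eq, beq_iff_eq]
  rw [eq_map_range_iff m n hlen hrow _
        (fun k hk => by simp [hlen]),
      eq_map_range_iff m n hlen hrow _
        (fun k hk => by simp [PySem.List.length_pyRange_one])]
  have hcellT : ∀ i < n, ∀ j < n,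
      ((m.map (fun row => PySem.List.pyGetD row (i : Int) 0)).getD j 0) = gAt m j i := by
    intro i hi j hj
    rw [List.getD_eq_getElem _ 0 (by simp [hlen]; omega), List.getElem_map,
        PySem.List.pyGetD_natCast]
    unfold gAt
    rw [List.getD_eq_getElem m [] (by omega)]
  have hcellR : ∀ i < n, ∀ j < n,
      (((PySem.List.pyRange 0 (n : Int) 1).map (fun j =>
        PySem.List.pyGetD (PySem.List.pyGetD m ((n : Int) - 1 - j) []) ((n : Int) - 1 - (i : Int)) 0)).getD j 0)
        = gAt m (n - 1 - j) (n - 1 - i) := by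
    intro i hi j hj
    rw [← PySem.List.pyGetD_natCast, PySem.List.pyGetD_map_pyRange _ n j 0 hj]
    rw [show ((n : Int) - 1 - (j : Int)) = ((n - 1 - j : Nat) : Int) by omega,
        show ((n : Int) - 1 - (i : Int)) = ((n - 1 - i : Nat) : Int) by omega,
        PySem.List.pyGetD_natCast, PySem.List.pyGetD_natCast]
    rfl
  constructor
  · rintro ⟨h1, h2⟩ i hi j hj
    refine ⟨?_, ?_⟩
    · rw [h1 i hi j hj, hcellT i hi j hj]
    · rw [h2 i hi j hj, hcellR i hi j hj]
  · intro h
    refine ⟨fun i hi j hj => ?_, fun i hi j hj => ?_⟩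
    · rw [hcellT i hi j hj]; exact (h i hi j hj).1
    · rw [hcellR i hi j hj]; exact (h i hi j hj).2

lemma alt_true_iff (n : Nat) (matrix : List (List Int))
    (hn : n ≤ matrix.length) (hrow : ∀ i < n, n ≤ (matrix.getD i []).length) :
    checkBysimmetric_alt (n : Int) matrix = true ↔
      ∀ i < n, ∀ j < n, cellP matrix n i j := by
  unfold checkBysimmetric_alt
  simp only [PySem.List.slice_to_natCast]
  have hlenM : ((matrix.take n).map (fun row => row.take n)).length = n := by
    simp; omega
  have hgetM : ∀ i < n, ((matrix.take n).map (fun row => row.take n)).getD i [] =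
      (matrix.getD i []).take n := by
    intro i hi
    rw [List.getD_eq_getElem _ [] (by omega), List.getElem_map, List.getElem_take,
        List.getD_eq_getElem matrix [] (by omega)]
  have hrowM : ∀ row ∈ (matrix.take n).map (fun row => row.take n), row.length = n := by
    intro row hr
    obtain ⟨i, hi, hrw⟩ := List.mem_iff_getElem.mp hr
    have hi' : i < n := by rw [hlenM] at hi; omega
    rw [← hrw, ← List.getD_eq_getElem _ [] hi, hgetM i hi']
    have := hrow i hi'
    rw [List.length_take]; omega
  have hgM : ∀ i < n, ∀ j < n,
      gAt ((matrix.take n).map (fun row => row.take n)) i j = gAt matrix i j := by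
    intro i hi j hj
    unfold gAt
    rw [hgetM i hi]
    have hrl := hrow i hi
    rw [List.getD_eq_getElem _ 0 (by rw [List.length_take]; omega), List.getElem_take,
        List.getD_eq_getElem _ 0 (by omega)]
  rw [square_check ((matrix.take n).map (fun row => row.take n)) n hlenM hrowM]
  constructor
  · intro h i hi j hj
    have hc := h i hi j hj
    unfold cellP at hc ⊢
    rw [hgM i hi j hj, hgM j hj i hi, hgM (n - 1 - j) (by omega) (n - 1 - i) (by omega)] at hc
    exact hc
  · intro h i hi j hj
    have hc := h i hi j hj
    unfold cellP at hc ⊢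
    rw [hgM i hi j hj, hgM j hj i hi, hgM (n - 1 - j) (by omega) (n - 1 - i) (by omega)]
    exact hc

-- ===== VERDICT (by name: the statement is the Claim_ definition above) =====
theorem checkBysimmetric_spec : Claim_equal_checkBysimmetric := by
  intro dim matrix _ hpre
  obtain ⟨h0, hlen, hrowp⟩ := hpre
  unfold Spec_checkBysimmetric
  have hd : dim = ((dim.toNat : Nat) : Int) := by omega
  rw [hd]
  have hn' : dim.toNat ≤ matrix.length := by omega
  have hrow' : ∀ i < dim.toNat, dim.toNat ≤ (matrix.getD i []).length := by
    intro i hi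
    have := hrowp i hi
    omega
  rw [Bool.eq_iff_iff, a_true_iff dim.toNat matrix hn' hrow',
      alt_true_iff dim.toNat matrix hn' hrow']
  constructor
  · intro h
    exact half_suffices dim.toNat (fun i j => gAt matrix i j) h
  · intro h i hi j hj
    exact h i (by omega) j hj
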